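-- pv_equiv track=rewrite | github.com/ArielHorwitz/botroyale | botroyale/gui/kex/widgets/input_manager.py | _format_keys
-- ===== SOURCE A (Python) =====
-- from typing import Callable, Union, TypeVar
--
-- KeysFormat = TypeVar("KeysFormat", bound=str)
--
-- MODIFIER_SORT = "^!+#"
--
-- MOD2KEY = {
--     "ctrl": "^",
--     "alt-gr": "!",
--     "alt": "!",
--     "shift": "+",
--     "super": "#",
--     "meta": "#",
--     "control": "^",
--     "lctrl": "^",
--     "rctrl": "^",
--     "lalt": "!",
--     "ralt": "!",
--     "lshift": "+",
--     "rshift": "+",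
--     "numlock": "",
--     "capslock": "",
-- }
--
-- def _format_keys(
--     modifiers: list[str],
--     key_name: str,
--     honor_numlock: bool = True,
-- ) -> KeysFormat:
--     """Convert a combination of keys to a standard string format."""
--     if (
--         honor_numlock
--         and "numlock" in modifiers
--         and key_name.startswith("numpad")
--         and len(key_name) == 7
--     ):
--         key_name = key_name[-1]
--     # Remove duplicate modifiers
--     modifiers = set(MOD2KEY[mod] for mod in modifiers)
--     modifiers -= {""}
--     # Remove modifier if it is the main key being pressed
--     # e.g. when key_name == "lctrl", "ctrl" will be in modifiers
--     if key_name in MOD2KEY: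
--         modifiers -= {MOD2KEY[key_name]}
--     # No space required if no modifiers
--     if len(modifiers) == 0:
--         return key_name
--     # Order of modifiers should be consistent
--     sorted_modifiers = sorted(modifiers, key=lambda x: MODIFIER_SORT.index(x))
--     # Return the KeysFormat
--     mod_str = "".join(sorted_modifiers)
--     return f"{mod_str} {key_name}"
-- ===== SOURCE B (Python) =====
-- MOD2BIT = {
--     "ctrl": 8,
--     "alt-gr": 4,
--     "alt": 4,
--     "shift": 2,
--     "super": 1,
--     "meta": 1,
--     "control": 8,
--     "lctrl": 8,
--     "rctrl": 8,
--     "lalt": 4,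
--     "ralt": 4,
--     "lshift": 2,
--     "rshift": 2,
--     "numlock": 0,
--     "capslock": 0,
-- }
--
-- # PREFIX[m] spells out bitmask m (8="^", 4="!", 2="+", 1="#") in the standard order.
-- PREFIX = [
--     "", "#", "+", "+#", "!", "!#", "!+", "!+#",
--     "^", "^#", "^+", "^+#", "^!", "^!#", "^!+", "^!+#",
-- ]
--
--
-- def _format_keys(modifiers, key_name, honor_numlock=True):
--     """Convert a combination of keys to a standard string format."""
--     mask = 0
--     for mod in modifiers:
--         mask |= MOD2BIT[mod]
--     if (
--         honor_numlock
--         and "numlock" in modifiers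
--         and key_name.startswith("numpad")
--         and len(key_name) == 7
--     ):
--         key_name = key_name[-1]
--     # Clear the bit of the main key being pressed (if it is itself a modifier)
--     mask &= 15 ^ MOD2BIT.get(key_name, 0)
--     if mask == 0:
--         return key_name
--     return PREFIX[mask] + " " + key_name
-- ===== Notes on version B (the rewrite author's own statement) =====
-- stated objective: alternative
-- what changed: B replaces A's symbol-set construction, set subtractions and key-based sort by integer bit arithmetic: each modifier maps to a bit (8/4/2/1), the bits are OR-ed into one mask, the pressed key's own bit is cleared with '& (15 ^ bit)', and the modifier prefix is read from a precomputed 16-entry table indexed by the mask.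
import Mathlib
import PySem

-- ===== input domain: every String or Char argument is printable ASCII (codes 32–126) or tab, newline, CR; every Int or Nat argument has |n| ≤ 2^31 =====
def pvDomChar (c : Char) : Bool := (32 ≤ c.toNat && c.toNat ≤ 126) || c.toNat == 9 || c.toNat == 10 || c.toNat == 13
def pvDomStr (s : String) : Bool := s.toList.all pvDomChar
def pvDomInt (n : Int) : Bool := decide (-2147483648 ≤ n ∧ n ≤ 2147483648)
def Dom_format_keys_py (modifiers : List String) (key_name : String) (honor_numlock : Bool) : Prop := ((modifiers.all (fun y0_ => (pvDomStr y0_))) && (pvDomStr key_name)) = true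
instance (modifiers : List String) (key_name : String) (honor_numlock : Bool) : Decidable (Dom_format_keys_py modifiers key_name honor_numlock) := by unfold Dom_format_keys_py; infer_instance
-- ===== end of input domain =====

-- B replaces A's symbol-set construction, set subtractions and key-based sort by bit
-- arithmetic: modifiers are OR-ed into a 4-bit mask, the pressed key's own bit is cleared,
-- and the prefix is read from a 16-entry table indexed by the mask (objective: alternative).


-- module-level constants of Source A
def pvMOD2KEY : PySem.Dict String String := PySem.Dict.ofList [("ctrl","^"),("alt-gr","!"),("alt","!"),("shift","+"),("super","#"),("meta","#"),("control","^"),("lctrl","^"),("rctrl","^"),("lalt","!"),("ralt","!"),("lshift","+"),("rshift","+"),("numlock",""),("capslock","")]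
def pvMODSORT : String := "^!+#"
-- MOD2KEY[m]; total form via getD, exact under Pre_ (KeyError on unknown modifiers is excluded there)
def pvM2K (m : String) : String := (pvMOD2KEY.get? m).getD ""

-- ===== PORT A =====
def format_keys_py (modifiers : List String) (key_name : String) (honor_numlock : Bool) : String :=
  let key_name :=
    if honor_numlock && modifiers.contains "numlock" && PySem.Str.startswith key_name "numpad"
        && (PySem.Str.len key_name == 7) then
      match PySem.Str.pyGet? key_name (-1) with   -- key_name[-1]; len = 7 makes `none` unreachable
      | some c => String.ofList [c]
      | none => key_name
    else key_name
  let mods : PySem.Set String := PySem.Set.ofList (modifiers.map pvM2K)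
  let mods := PySem.Set.diff mods [""]
  let mods := if pvMOD2KEY.contains key_name then PySem.Set.diff mods [pvM2K key_name] else mods
  if PySem.Set.len mods == 0 then key_name
  else
    -- sorted(mods, key=lambda x: MODIFIER_SORT.index(x)); every element is in MODIFIER_SORT,
    -- so Str.find (= -1 only if absent) is exactly .index here; key is injective on the set,
    -- so the result does not depend on the set's iteration order
    let sorted_modifiers := PySem.List.sorted mods (fun x => PySem.Str.find pvMODSORT x) false
    PySem.Str.join "" sorted_modifiers ++ " " ++ key_name

-- ===== PORT B =====
-- module-level constants of Source B; MOD2BIT's values are in {0,1,2,4,8}, the mask stays in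
-- 0..15, so Nat bitwise ops are exact for Source B's int arithmetic here
def pvMOD2BIT : PySem.Dict String Nat := PySem.Dict.ofList [("ctrl",8),("alt-gr",4),("alt",4),("shift",2),("super",1),("meta",1),("control",8),("lctrl",8),("rctrl",8),("lalt",4),("ralt",4),("lshift",2),("rshift",2),("numlock",0),("capslock",0)]
def pvPREFIX : List String := ["", "#", "+", "+#", "!", "!#", "!+", "!+#", "^", "^#", "^+", "^+#", "^!", "^!#", "^!+", "^!+#"]

def format_keys_py_alt (modifiers : List String) (key_name : String) (honor_numlock : Bool) : String :=
  -- MOD2BIT[mod]; total form via getD, exact under Pre_ (KeyError excluded there)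
  let mask : Nat := modifiers.foldl (fun acc m => acc ||| (pvMOD2BIT.get? m).getD 0) 0
  let key_name :=
    if honor_numlock && modifiers.contains "numlock" && PySem.Str.startswith key_name "numpad"
        && (PySem.Str.len key_name == 7) then
      match PySem.Str.pyGet? key_name (-1) with
      | some c => String.ofList [c]
      | none => key_name
    else key_name
  let mask := mask &&& (15 ^^^ (pvMOD2BIT.get? key_name).getD 0)   -- mask &= 15 ^ MOD2BIT.get(key_name, 0)
  -- PREFIX[mask]: mask ≤ 15 always, so the plain getD indexing is exact
  if mask == 0 then key_name
  else pvPREFIX.getD mask "" ++ " " ++ key_name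

-- ===== PRECONDITION & SPEC =====
-- Pre_ excludes exactly the inputs where a modifier is not a key of MOD2KEY: there the
-- Python A (and B) raises KeyError.
def Pre_format_keys_py (modifiers : List String) (key_name : String) (honor_numlock : Bool) : Prop :=
  ∀ m ∈ modifiers, pvMOD2KEY.contains m = true
instance (modifiers : List String) (key_name : String) (honor_numlock : Bool) : Decidable (Pre_format_keys_py modifiers key_name honor_numlock) := by unfold Pre_format_keys_py; infer_instance
def pvWitness_format_keys_py : List String × String × Bool := (["ctrl", "shift"], "a", true)
def Spec_format_keys_py (modifiers : List String) (key_name : String) (honor_numlock : Bool) (out : String) : Prop := out = format_keys_py_alt modifiers key_name honor_numlock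
instance (modifiers : List String) (key_name : String) (honor_numlock : Bool) (out : String) : Decidable (Spec_format_keys_py modifiers key_name honor_numlock out) := by unfold Spec_format_keys_py; infer_instance

-- ===== CLAIM (what is proved, stated in full; the proofs are below) =====
def Claim_equal_format_keys_py : Prop := ∀ (modifiers : List String) (key_name : String) (honor_numlock : Bool), Dom_format_keys_py modifiers key_name honor_numlock → Pre_format_keys_py modifiers key_name honor_numlock → Spec_format_keys_py modifiers key_name honor_numlock (format_keys_py modifiers key_name honor_numlock)

-- ===== LEMMAS AND PROOFS =====

-- every value of MOD2KEY (and the getD default) is one of the five symbols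
theorem pvM2K_mem (m : String) : pvM2K m ∈ (["^", "!", "+", "#", ""] : List String) := by
  unfold pvM2K
  cases h : pvMOD2KEY.get? m with
  | none => simp
  | some v =>
    simp only [PySem.Dict.get?, Option.map_eq_some_iff] at h
    obtain ⟨p, hp, hv⟩ := h
    have hm := List.mem_of_find?_eq_some hp
    have hitems : pvMOD2KEY.items = [("ctrl","^"),("alt-gr","!"),("alt","!"),("shift","+"),("super","#"),("meta","#"),("control","^"),("lctrl","^"),("rctrl","^"),("lalt","!"),("ralt","!"),("lshift","+"),("rshift","+"),("numlock",""),("capslock","")] := by decide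
    rw [hitems] at hm
    subst hv
    fin_cases hm <;> simp

-- the symbol's bit: ^=8, !=4, +=2, #=1, everything else (incl. "") 0
def pvBit (s : String) : Nat := if s = "^" then 8 else if s = "!" then 4 else if s = "+" then 2 else if s = "#" then 1 else 0

-- MOD2BIT is MOD2KEY with each value replaced by its bit
theorem pvBIT_items : pvMOD2BIT.items = pvMOD2KEY.items.map (fun p => (p.1, pvBit p.2)) := by decide

theorem pvGet_bit (m : String) : pvMOD2BIT.get? m = (pvMOD2KEY.get? m).map pvBit := by
  show (pvMOD2BIT.items.find? (fun p => p.1 == m)).map (·.2) = ((pvMOD2KEY.items.find? (fun p => p.1 == m)).map (·.2)).map pvBit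
  rw [pvBIT_items, List.find?_map]
  have hp : ((fun p : String × Nat => p.1 == m) ∘ (fun p : String × String => (p.1, pvBit p.2))) = (fun p : String × String => p.1 == m) := by
    funext p; rfl
  rw [hp]
  cases h2 : pvMOD2KEY.items.find? (fun p => p.1 == m) <;> simp

theorem pvB2K (m : String) : (pvMOD2BIT.get? m).getD 0 = pvBit (pvM2K m) := by
  rw [pvGet_bit]; unfold pvM2K
  cases pvMOD2KEY.get? m <;> rfl

-- the four presence bits of a list of symbols, as B's mask accumulates them
def pvN (syms : List String) : Nat :=
  (if syms.contains "^" then 8 else 0) ||| ((if syms.contains "!" then 4 else 0) ||| ((if syms.contains "+" then 2 else 0) ||| (if syms.contains "#" then 1 else 0)))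

theorem pvN_cons (s : String) (hs : s ∈ (["^", "!", "+", "#", ""] : List String)) (syms : List String) (a : Nat) :
    (a ||| pvBit s) ||| pvN syms = a ||| pvN (s :: syms) := by
  fin_cases hs <;>
    by_cases h8 : "^" ∈ syms <;> by_cases h4 : "!" ∈ syms <;>
    by_cases h2 : "+" ∈ syms <;> by_cases h1 : "#" ∈ syms <;>
      simp [pvN, pvBit, h8, h4, h2, h1, Nat.lor_assoc]

-- B's OR-loop computes exactly the presence bits of the mapped symbols
theorem pv_fold (l : List String) (a : Nat) :
    l.foldl (fun acc m => acc ||| (pvMOD2BIT.get? m).getD 0) a = a ||| pvN (l.map pvM2K) := by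
  induction l generalizing a with
  | nil => simp [pvN]
  | cons m l ih =>
    rw [List.foldl_cons, ih, pvB2K, List.map_cons]
    exact pvN_cons (pvM2K m) (pvM2K_mem m) (l.map pvM2K) a

-- the possible values of MOD2KEY.get on the pressed key
theorem pv_ov (k : String) : pvMOD2KEY.get? k = none ∨ pvMOD2KEY.get? k = some "" ∨ pvMOD2KEY.get? k = some "^" ∨ pvMOD2KEY.get? k = some "!" ∨ pvMOD2KEY.get? k = some "+" ∨ pvMOD2KEY.get? k = some "#" := by
  have h := pvM2K_mem k
  unfold pvM2K at h
  cases hk : pvMOD2KEY.get? k with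
  | none => exact Or.inl rfl
  | some v =>
    rw [hk] at h
    simp only [Option.getD_some, List.mem_cons, List.not_mem_nil, or_false] at h
    rcases h with rfl | rfl | rfl | rfl | rfl <;> simp

-- masking out the key's own bit and indexing PREFIX is exactly the ordered filter of the
-- present symbols other than the key's own
theorem pv_bridge (syms : List String) (ov : Option String)
    (hov : ov = none ∨ ov = some "" ∨ ov = some "^" ∨ ov = some "!" ∨ ov = some "+" ∨ ov = some "#") :
    ((pvN syms &&& (15 ^^^ pvBit (ov.getD ""))) == 0)
      = ((["^", "!", "+", "#"] : List String).filter (fun c => syms.contains c && decide (ov ≠ some c))).isEmpty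
    ∧ pvPREFIX.getD (pvN syms &&& (15 ^^^ pvBit (ov.getD ""))) ""
      = PySem.Str.join "" ((["^", "!", "+", "#"] : List String).filter (fun c => syms.contains c && decide (ov ≠ some c))) := by
  rcases hov with rfl | rfl | rfl | rfl | rfl | rfl <;>
    by_cases h8 : "^" ∈ syms <;> by_cases h4 : "!" ∈ syms <;>
    by_cases h2 : "+" ∈ syms <;> by_cases h1 : "#" ∈ syms <;>
      refine ⟨?_, ?_⟩ <;> simp [pvN, pvBit, pvPREFIX, h8, h4, h2, h1, List.filter] <;> rfl

-- the heart of the A-side: after the (identical) numlock rewriting, A's set arithmetic and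
-- sort produce the ordered filter of present symbols other than the key's own
theorem pv_core (syms : List String) (k : String)
    (hs : ∀ s ∈ syms, s ∈ (["^", "!", "+", "#", ""] : List String)) :
    (if PySem.Set.len (if pvMOD2KEY.contains k then PySem.Set.diff (PySem.Set.diff (PySem.Set.ofList syms) [""]) [(pvMOD2KEY.get? k).getD ""] else PySem.Set.diff (PySem.Set.ofList syms) [""]) == 0 then k
     else PySem.Str.join "" (PySem.List.sorted (if pvMOD2KEY.contains k then PySem.Set.diff (PySem.Set.diff (PySem.Set.ofList syms) [""]) [(pvMOD2KEY.get? k).getD ""] else PySem.Set.diff (PySem.Set.ofList syms) [""]) (fun x => PySem.Str.find pvMODSORT x) false) ++ " " ++ k)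
    =
    (if ((["^", "!", "+", "#"] : List String).filter
          (fun c => syms.contains c && decide (pvMOD2KEY.get? k ≠ some c))).isEmpty then k
     else PySem.Str.join "" ((["^", "!", "+", "#"] : List String).filter
          (fun c => syms.contains c && decide (pvMOD2KEY.get? k ≠ some c))) ++ " " ++ k) := by
  set key : String → Int := fun x => PySem.Str.find pvMODSORT x with hkey
  set pB : String → Bool := fun c => syms.contains c && decide (pvMOD2KEY.get? k ≠ some c) with hpB
  set S1 : PySem.Set String := PySem.Set.diff (PySem.Set.ofList syms) [""] with hS1
  set S2 : PySem.Set String := if pvMOD2KEY.contains k then PySem.Set.diff S1 [(pvMOD2KEY.get? k).getD ""] else S1 with hS2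
  set mods : List String := (["^", "!", "+", "#"] : List String).filter pB with hmods
  -- membership characterisation of S2
  have hmemS2 : ∀ a : String, a ∈ S2 ↔ (a ∈ syms ∧ a ≠ "" ∧ pvMOD2KEY.get? k ≠ some a) := by
    intro a
    by_cases hc : pvMOD2KEY.contains k = true
    · have hsome : (pvMOD2KEY.get? k).isSome := by rw [← PySem.Dict.contains_eq_isSome_get?]; exact hc
      obtain ⟨v, hv⟩ := Option.isSome_iff_exists.mp hsome
      rw [hS2, if_pos hc, hS1]
      simp only [PySem.Set.mem_diff, PySem.Set.mem_ofList, hv, Option.getD_some, List.mem_singleton,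
        ne_eq, Option.some.injEq]
      constructor
      · rintro ⟨⟨h1, h2⟩, h3⟩; exact ⟨h1, h2, fun h => h3 h.symm⟩
      · rintro ⟨h1, h2, h3⟩; exact ⟨⟨h1, h2⟩, fun h => h3 h.symm⟩
    · have hn : pvMOD2KEY.get? k = none := by
        rw [Option.eq_none_iff_forall_ne_some]
        intro v hv
        exact hc (by rw [PySem.Dict.contains_eq_isSome_get?, hv]; rfl)
      rw [hS2, if_neg hc, hS1]
      simp [PySem.Set.mem_diff, PySem.Set.mem_ofList, hn]
  -- same membership as mods
  have hmem : ∀ a : String, a ∈ mods ↔ a ∈ S2 := by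
    intro a
    rw [hmods, List.mem_filter, hmemS2, hpB]
    constructor
    · rintro ⟨hf, hb⟩
      simp only [Bool.and_eq_true, decide_eq_true_eq, List.contains_iff_mem] at hb
      refine ⟨hb.1, ?_, hb.2⟩
      fin_cases hf <;> decide
    · rintro ⟨hsy, hne, hget⟩
      have := hs a hsy
      refine ⟨?_, ?_⟩
      · fin_cases this <;> first | decide | simp_all
      · simp only [Bool.and_eq_true, decide_eq_true_eq, List.contains_iff_mem]
        exact ⟨hsy, hget⟩
    -- nodups
  have hnodupS2 : S2.Nodup := by
    rw [hS2]
    split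
    · exact PySem.Set.nodup_diff _ _ (PySem.Set.nodup_diff _ _ (PySem.Set.nodup_ofList _))
    · exact PySem.Set.nodup_diff _ _ (PySem.Set.nodup_ofList _)
  have hnodupM : mods.Nodup := List.Nodup.filter _ (by decide)
  have hperm : mods.Perm S2 := (List.perm_ext_iff_of_nodup hnodupM hnodupS2).mpr hmem
  have hpair : List.Pairwise (fun a b => key a < key b) mods :=
    List.Pairwise.sublist (List.filter_sublist) (by rw [hkey]; decide)
  have hsorted : PySem.List.sorted S2 key false = mods :=
    PySem.List.sorted_eq_of_perm_of_pairwise_lt S2 mods key hperm hpair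
  -- emptiness
  have hlen : (PySem.Set.len S2 == 0) = mods.isEmpty := by
    have hl : mods.length = S2.length := hperm.length_eq
    rw [Bool.eq_iff_iff]
    simp only [PySem.Set.len, beq_iff_eq, List.isEmpty_iff_length_eq_zero]
    omega
  rw [hlen, hsorted]

-- the heart of the B-side: the mask computation equals the same ordered filter
theorem pv_coreB (modifiers : List String) (k : String) :
    (if ((modifiers.foldl (fun acc m => acc ||| (pvMOD2BIT.get? m).getD 0) 0) &&& (15 ^^^ (pvMOD2BIT.get? k).getD 0)) == 0 then k
     else pvPREFIX.getD ((modifiers.foldl (fun acc m => acc ||| (pvMOD2BIT.get? m).getD 0) 0) &&& (15 ^^^ (pvMOD2BIT.get? k).getD 0)) "" ++ " " ++ k)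
    =
    (if ((["^", "!", "+", "#"] : List String).filter
          (fun c => (modifiers.map pvM2K).contains c && decide (pvMOD2KEY.get? k ≠ some c))).isEmpty then k
     else PySem.Str.join "" ((["^", "!", "+", "#"] : List String).filter
          (fun c => (modifiers.map pvM2K).contains c && decide (pvMOD2KEY.get? k ≠ some c))) ++ " " ++ k) := by
  have hmask : (modifiers.foldl (fun acc m => acc ||| (pvMOD2BIT.get? m).getD 0) 0) = pvN (modifiers.map pvM2K) := by
    rw [pv_fold]; exact Nat.zero_or _
  have hown : (pvMOD2BIT.get? k).getD 0 = pvBit ((pvMOD2KEY.get? k).getD "") := pvB2K k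
  obtain ⟨h1, h2⟩ := pv_bridge (modifiers.map pvM2K) (pvMOD2KEY.get? k) (pv_ov k)
  rw [hmask, hown, h1, h2]

-- ===== VERDICT (by name: the statement is the Claim_ definition above) =====
theorem format_keys_py_spec : Claim_equal_format_keys_py := by
  unfold Claim_equal_format_keys_py
  intro modifiers key_name honor_numlock _ _
  unfold Spec_format_keys_py format_keys_py format_keys_py_alt
  exact (pv_core (modifiers.map pvM2K) _
      (by intro s hsm; obtain ⟨m, _, rfl⟩ := List.mem_map.mp hsm; exact pvM2K_mem m)).trans
    (pv_coreB modifiers _).symm
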